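-- pv_equiv track=rewrite | github.com/kavigupta/urbanstats | urbanstats/geometry/rle.py | merge_rle_runs
-- ===== SOURCE A (Python) =====
-- from collections import defaultdict
--
-- def _merge_intervals(intervals):
--     """Merge overlapping/adjacent intervals. intervals is sorted list of (s, e)."""
--     if not intervals:
--         return []
--     merged = [intervals[0]]
--     for a, b in intervals[1:]:
--         if a <= merged[-1][1] + 1:
--             merged[-1] = (merged[-1][0], max(merged[-1][1], b))
--         else:
--             merged.append((a, b))
--     return merged
--
-- def merge_rle_runs(list_of_rles):
--     """
--     Union multiple dict-format RLEs into one.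
--     Returns dict {row: [(lon_start, lon_end), ...]}.
--     """
--     if not list_of_rles:
--         return {}
--     by_row = defaultdict(list)
--     for d in list_of_rles:
--         for row, intervals in d.items():
--             by_row[row].extend(intervals)
--     return {
--         row: _merge_intervals(sorted(intervals))
--         for row, intervals in sorted(by_row.items())
--     }
-- ===== SOURCE B (Python) =====
-- def _merge_dc(ivs):
--     """Merge a sorted interval list by divide and conquer: merge each half
--     recursively, then splice the halves by cascading the left result's last
--     interval through the right result's leading blocks."""
--     n = len(ivs)
--     if n <= 1:
--         return list(ivs)
--     left = _merge_dc(ivs[:n // 2])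
--     right = _merge_dc(ivs[n // 2:])
--     a, b = left[-1]
--     out = left[:-1]
--     i = 0
--     while i < len(right) and right[i][0] <= b + 1:
--         b = max(b, right[i][1])
--         i += 1
--     out.append((a, b))
--     out.extend(right[i:])
--     return out
--
-- def merge_rle_runs(list_of_rles):
--     pairs = [(row, ivs) for d in list_of_rles for row, ivs in d.items()]
--     rows = sorted({row for row, _ in pairs})
--     triples = sorted((row, iv) for row, ivs in pairs for iv in ivs)
--     out = {}
--     i, n = 0, len(triples)
--     for row in rows:
--         ivs = []
--         while i < n and triples[i][0] == row:
--             ivs.append(triples[i][1])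
--             i += 1
--         out[row] = _merge_dc(ivs)
--     return out
-- ===== Notes on version B (the rewrite author's own statement) =====
-- stated objective: alternative
-- what changed: B replaces A's defaultdict grouping and linear accumulator merge with a sort-and-merge-join over globally sorted (row, interval) triples, and merges each row's intervals by divide and conquer: recursively merge each half, then splice the two results by cascading the left half's last block through the right half's leading blocks.
import Mathlib
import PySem

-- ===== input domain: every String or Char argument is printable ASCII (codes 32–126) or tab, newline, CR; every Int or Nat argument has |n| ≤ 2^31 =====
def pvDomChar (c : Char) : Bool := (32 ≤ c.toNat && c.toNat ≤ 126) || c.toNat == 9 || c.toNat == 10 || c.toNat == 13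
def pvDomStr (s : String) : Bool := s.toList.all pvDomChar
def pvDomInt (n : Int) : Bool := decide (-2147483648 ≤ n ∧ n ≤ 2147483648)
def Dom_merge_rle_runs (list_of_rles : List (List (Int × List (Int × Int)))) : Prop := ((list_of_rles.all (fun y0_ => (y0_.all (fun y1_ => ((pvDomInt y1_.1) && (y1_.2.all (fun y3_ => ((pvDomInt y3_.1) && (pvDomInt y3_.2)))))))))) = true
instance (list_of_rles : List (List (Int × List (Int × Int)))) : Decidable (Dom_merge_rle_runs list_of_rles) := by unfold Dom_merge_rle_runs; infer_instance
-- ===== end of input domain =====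

-- B unions the RLEs by one global sort of (row, interval) triples followed by a merge-join
-- against the sorted row-key set, and merges each row's intervals by divide and conquer:
-- recursively merge each half, then splice by cascading the left result's last block
-- through the right result's leading blocks (objective: alternative).

-- ===== PORT A =====
-- one step of _merge_intervals' loop; merged[-1] of the (always nonempty) accumulator is getLast?
-- (the 'none' branch is never reached: the accumulator starts as [intervals[0]])
def pvStepMerge (merged : List (Int × Int)) (iv : Int × Int) : List (Int × Int) :=
  match merged.getLast? with
  | some lb => if iv.1 ≤ lb.2 + 1 then merged.dropLast ++ [(lb.1, max lb.2 iv.2)] else merged ++ [iv]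
  | none => merged ++ [iv]

def pvMergeIntervals (intervals : List (Int × Int)) : List (Int × Int) :=
  match intervals with
  | [] => []
  | x :: rest => rest.foldl pvStepMerge [x]

def merge_rle_runs (list_of_rles : List (List (Int × List (Int × Int)))) : List (Int × List (Int × Int)) :=
  if list_of_rles.isEmpty then []
  else
    -- by_row[row].extend(intervals) on a defaultdict(list)
    let by_row : PySem.Dict Int (List (Int × Int)) :=
      list_of_rles.foldl
        (fun d rle => rle.foldl (fun d p => d.modify p.1 [] (fun v => v ++ p.2)) d) PySem.Dict.empty
    -- sorted(by_row.items()): dict keys are distinct, so Python's lexicographic pair sort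
    -- never compares the value lists; sorting by the key alone is exact here
    let items := PySem.List.sorted by_row.items (fun p => p.1) false
    -- the dict comprehension: a dict built over pairs with distinct keys, read back as items
    (items.foldl
      (fun acc p =>
        acc.insert p.1 (pvMergeIntervals (PySem.List.sorted2 p.2 (fun iv => iv.1) (fun iv => iv.2))))
      PySem.Dict.empty).items

-- ===== PORT B =====
-- the splice's while loop: i walks right while right[i][0] <= b + 1, b accumulates the max end;
-- then out.append((a, b)); out.extend(right[i:])
def pvCascade (l : Int × Int) : List (Int × Int) → List (Int × Int)
  | [] => [l]
  | (c, d) :: r => if c ≤ l.2 + 1 then pvCascade (l.1, max l.2 d) r else l :: (c, d) :: r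

-- left[:-1] ++ cascade of left[-1] into right (the 'none' branch guards left = [], unreachable in B)
def pvCombine (L R : List (Int × Int)) : List (Int × Int) :=
  match L.getLast? with
  | none => R
  | some l => L.dropLast ++ pvCascade l R

-- the divide-and-conquer _merge_dc
def pvDC (ivs : List (Int × Int)) : List (Int × Int) :=
  if ivs.length ≤ 1 then ivs
  else pvCombine (pvDC (ivs.take (ivs.length / 2))) (pvDC (ivs.drop (ivs.length / 2)))
termination_by ivs.length
decreasing_by
  · simp; omega
  · simp; omega

-- Python's comparison of the nested tuples (row, (s, e)) is lexicographic: ported as a ×ₗ key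
def pvKey3 (t : Int × (Int × Int)) : Lex (Int × Lex (Int × Int)) :=
  toLex (t.1, toLex (t.2.1, t.2.2))

-- the merge-join loop: 'for row in rows' with the single cursor i into the sorted triples;
-- the inner 'while triples[i][0] == row' is the takeWhile, advancing i is the dropWhile
def pvJoin (rows : List Int) (ts : List (Int × (Int × Int))) : List (Int × List (Int × Int)) :=
  match rows with
  | [] => []
  | r :: rs =>
      (r, pvDC ((ts.takeWhile (fun q => q.1 == r)).map (fun q => q.2)))
        :: pvJoin rs (ts.dropWhile (fun q => q.1 == r))

def merge_rle_runs_alt (list_of_rles : List (List (Int × List (Int × Int)))) : List (Int × List (Int × Int)) :=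
  let pairs := list_of_rles.flatten
  let rows := PySem.List.sorted (PySem.Set.ofList (pairs.map (fun p => p.1))) (fun r => r) false
  let triples := PySem.List.sorted (pairs.flatMap (fun p => p.2.map (fun iv => (p.1, iv)))) pvKey3 false
  pvJoin rows triples

-- ===== PRECONDITION & SPEC =====
def Spec_merge_rle_runs (list_of_rles : List (List (Int × List (Int × Int)))) (out : List (Int × List (Int × Int))) : Prop := out = merge_rle_runs_alt list_of_rles
instance (list_of_rles : List (List (Int × List (Int × Int)))) (out : List (Int × List (Int × Int))) : Decidable (Spec_merge_rle_runs list_of_rles out) := by unfold Spec_merge_rle_runs; infer_instance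

-- ===== CLAIM (what is proved, stated in full; the proofs are below) =====
def Claim_equal_merge_rle_runs : Prop := ∀ (list_of_rles : List (List (Int × List (Int × Int)))), Dom_merge_rle_runs list_of_rles → Spec_merge_rle_runs list_of_rles (merge_rle_runs list_of_rles)

-- ===== LEMMAS AND PROOFS =====

-- a cascade always starts with the left block's start
theorem pvCascade_cons (a b : Int) (X : List (Int × Int)) :
    ∃ b' t, pvCascade (a, b) X = (a, b') :: t := by
  induction X generalizing b with
  | nil => exact ⟨b, [], rfl⟩
  | cons x t ih =>
    obtain ⟨c, d⟩ := x
    by_cases h : c ≤ b + 1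
    · simpa [pvCascade, h] using ih (max b d)
    · exact ⟨b, (c, d) :: t, by simp [pvCascade, h]⟩

-- composition law: cascading into a cascade is one cascade with the merged block
theorem pvCascade_comp (X : List (Int × Int)) :
    ∀ a b c d : Int, c ≤ b + 1 →
      pvCascade (a, b) (pvCascade (c, d) X) = pvCascade (a, max b d) X := by
  induction X with
  | nil => intro a b c d h; simp [pvCascade, h]
  | cons x t ih =>
    intro a b c d h
    obtain ⟨x1, y⟩ := x
    by_cases h1 : x1 ≤ d + 1
    · rw [show pvCascade (c, d) ((x1, y) :: t) = pvCascade (c, max d y) t from by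
        simp [pvCascade, h1], ih a b c (max d y) h]
      have h2 : x1 ≤ max b d + 1 := le_trans h1 (by simp)
      simp [pvCascade, h2, max_assoc]
    · rw [show pvCascade (c, d) ((x1, y) :: t) = (c, d) :: (x1, y) :: t from by
        simp [pvCascade, h1]]
      simp [pvCascade, h]

-- A's accumulator loop is a cascade of the last block through the merge of the rest
theorem foldl_step_cascade (ys : List (Int × Int)) :
    ∀ (acc : List (Int × Int)) (a b : Int),
      ys.foldl pvStepMerge (acc ++ [(a, b)]) = acc ++ pvCascade (a, b) (pvMergeIntervals ys) := by
  induction ys with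
  | nil => intro acc a b; simp [pvMergeIntervals, pvCascade]
  | cons x rest ih =>
    intro acc a b
    obtain ⟨c, d⟩ := x
    have hM : pvMergeIntervals ((c, d) :: rest) = pvCascade (c, d) (pvMergeIntervals rest) := by
      simpa [pvMergeIntervals] using ih [] c d
    simp only [List.foldl_cons, pvStepMerge, List.getLast?_concat]
    by_cases h : c ≤ b + 1
    · rw [if_pos h, List.dropLast_concat, ih acc a (max b d), hM,
        pvCascade_comp _ a b c d h]
    · rw [if_neg h,
        show acc ++ [(a, b)] ++ [(c, d)] = (acc ++ [(a, b)]) ++ [(c, d)] from by simp,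
        ih (acc ++ [(a, b)]) c d, hM]
      obtain ⟨d', t, hc⟩ := pvCascade_cons c d (pvMergeIntervals rest)
      rw [hc]
      simp [pvCascade, h]

theorem mergeIntervals_cons (a b : Int) (xs : List (Int × Int)) :
    pvMergeIntervals ((a, b) :: xs) = pvCascade (a, b) (pvMergeIntervals xs) := by
  simpa [pvMergeIntervals] using foldl_step_cascade xs [] a b

-- continuing A's loop from a nonempty accumulator is B's splice
theorem foldl_step_combine (ys L : List (Int × Int)) (hL : L ≠ []) :
    ys.foldl pvStepMerge L = pvCombine L (pvMergeIntervals ys) := by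
  rcases List.eq_nil_or_concat L with rfl | ⟨init, l, rfl⟩
  · exact absurd rfl hL
  · obtain ⟨a, b⟩ := l
    rw [List.concat_eq_append, foldl_step_cascade ys init a b]
    simp [pvCombine]

-- the merge is a homomorphism for append via the splice
theorem mergeIntervals_append (xs ys : List (Int × Int)) :
    pvMergeIntervals (xs ++ ys) = pvCombine (pvMergeIntervals xs) (pvMergeIntervals ys) := by
  cases xs with
  | nil => simp [pvMergeIntervals, pvCombine]
  | cons x xs' =>
    have h : pvMergeIntervals (x :: xs' ++ ys)
        = ys.foldl pvStepMerge (pvMergeIntervals (x :: xs')) := by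
      simp [pvMergeIntervals, List.foldl_append]
    rw [h, foldl_step_combine]
    obtain ⟨a, b⟩ := x
    obtain ⟨b', t, hc⟩ := pvCascade_cons a b (pvMergeIntervals xs')
    simp [mergeIntervals_cons, hc]

-- the divide-and-conquer merge equals A's one-pass merge, on every list
theorem pvDC_eq (ivs : List (Int × Int)) : pvDC ivs = pvMergeIntervals ivs := by
  induction ivs using pvDC.induct with
  | case1 ivs h =>
    rw [pvDC, if_pos h]
    cases ivs with
    | nil => rfl
    | cons x xs =>
      cases xs with
      | nil => simp [pvMergeIntervals]
      | cons y ys => simp at h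
  | case2 ivs h ih1 ih2 =>
    rw [pvDC, if_neg h, ih1, ih2, ← mergeIntervals_append, List.take_append_drop]

-- the grouping fold, named for induction
def pvBuild (d : PySem.Dict Int (List (Int × Int))) (ps : List (Int × List (Int × Int))) :
    PySem.Dict Int (List (Int × Int)) :=
  ps.foldl (fun d p => d.modify p.1 [] (fun v => v ++ p.2)) d

theorem getD_pvBuild (ps : List (Int × List (Int × Int))) :
    ∀ d r, (pvBuild d ps).getD r [] =
      d.getD r [] ++ (ps.filter (fun p => p.1 == r)).flatMap (fun p => p.2) := by
  induction ps with
  | nil => intro d r; simp [pvBuild]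
  | cons p ps ih =>
    intro d r
    simp only [pvBuild, List.foldl_cons] at *
    rw [ih]
    by_cases h : p.1 = r
    · subst h
      rw [PySem.Dict.getD_modify_self]
      simp
    · rw [PySem.Dict.getD_modify_of_ne _ _ _ (fun hc => h hc.symm)]
      simp [h]

theorem keys_pvBuild (ps : List (Int × List (Int × Int))) :
    (pvBuild PySem.Dict.empty ps).keys = PySem.Set.ofList (ps.map (fun p => p.1)) := by
  unfold pvBuild
  rw [PySem.Dict.keys_foldl_modify_key ps (fun p => p.1) [] (fun _ p => fun v => v ++ p.2),
    PySem.Dict.keys_empty, PySem.Set.ofList_eq_foldl]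
  rfl

theorem takeWhile_append_of_all {α : Type} (p : α → Bool) (xs ys : List α)
    (h : ∀ x ∈ xs, p x = true) : (xs ++ ys).takeWhile p = xs ++ ys.takeWhile p := by
  induction xs with
  | nil => simp
  | cons x xs ih =>
    simp only [List.cons_append, List.takeWhile_cons, h x (List.mem_cons_self ..), if_true]
    simp [ih (fun y hy => h y (List.mem_cons_of_mem _ hy))]

theorem dropWhile_append_of_all {α : Type} (p : α → Bool) (xs ys : List α)
    (h : ∀ x ∈ xs, p x = true) : (xs ++ ys).dropWhile p = ys.dropWhile p := by
  induction xs with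
  | nil => simp
  | cons x xs ih =>
    simp only [List.cons_append, List.dropWhile_cons, h x (List.mem_cons_self ..)]
    simp [ih (fun y hy => h y (List.mem_cons_of_mem _ hy))]

theorem takeWhile_eq_nil_of_all_false {α : Type} (p : α → Bool) (l : List α)
    (h : ∀ x ∈ l, p x = false) : l.takeWhile p = [] := by
  cases l with
  | nil => rfl
  | cons x xs => simp [h x (List.mem_cons_self ..)]

theorem dropWhile_eq_self_of_all_false {α : Type} (p : α → Bool) (l : List α)
    (h : ∀ x ∈ l, p x = false) : l.dropWhile p = l := by
  cases l with
  | nil => rfl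
  | cons x xs => simp [h x (List.mem_cons_self ..)]

-- the merge-join over blocks of strictly increasing rows picks out exactly each row's block
theorem pvJoin_blocks (g : Int → List (Int × Int)) :
    ∀ (rows : List Int), rows.Pairwise (· < ·) →
      pvJoin rows (rows.flatMap (fun r => (g r).map (fun iv => (r, iv)))) =
        rows.map (fun r => (r, pvDC (g r))) := by
  intro rows
  induction rows with
  | nil => intro _; rfl
  | cons r rs ih =>
    intro hpw
    have hlt := (List.pairwise_cons.mp hpw).1
    have hne : ∀ q ∈ rs.flatMap (fun r' => (g r').map (fun iv => (r', iv))), (q.1 == r) = false := by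
      intro q hq
      obtain ⟨r', hr', hq'⟩ := List.mem_flatMap.mp hq
      obtain ⟨iv, _, rfl⟩ := List.mem_map.mp hq'
      simpa using (ne_of_gt (hlt r' hr'))
    have hall : ∀ q ∈ (g r).map (fun iv => (r, iv)), (q.1 == r) = true := by
      intro q hq
      obtain ⟨iv, _, rfl⟩ := List.mem_map.mp hq
      simp
    simp only [List.flatMap_cons, pvJoin]
    rw [takeWhile_append_of_all _ _ _ hall, takeWhile_eq_nil_of_all_false _ _ hne,
      dropWhile_append_of_all _ _ _ hall, dropWhile_eq_self_of_all_false _ _ hne,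
      ih (List.pairwise_cons.mp hpw).2]
    simp [List.map_map, Function.comp_def]

-- PySem's tuple-key sort is the plain sort under the lexicographic key
theorem sorted2_eq_sorted_lex {α : Type} (xs : List α) (k1 k2 : α → Int) :
    PySem.List.sorted2 xs k1 k2 false =
      PySem.List.sorted xs (fun x => toLex (k1 x, k2 x)) false := by
  rw [PySem.List.sorted_eq_foldl_insertBy]
  show List.foldl (fun acc x => PySem.List.insertBy
      (fun a b => decide (k1 a < k1 b) || (!decide (k1 b < k1 a) && decide (k2 a < k2 b))) x acc) [] xs = _
  have hcmp : (fun (a b : α) => decide (k1 a < k1 b) || (!decide (k1 b < k1 a) && decide (k2 a < k2 b)))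
      = fun a b => decide (toLex (k1 a, k2 a) < toLex (k1 b, k2 b)) := by
    funext a b
    rcases lt_trichotomy (k1 a) (k1 b) with h | h | h
    · simp [Prod.Lex.toLex_lt_toLex, h]
    · simp [Prod.Lex.toLex_lt_toLex, h]
    · simp [Prod.Lex.toLex_lt_toLex, h, not_lt_of_gt h, ne_of_gt h]
  rw [hcmp]

theorem pvKey3_injective : Function.Injective pvKey3 := by
  intro a b h
  obtain ⟨a1, a2, a3⟩ := a
  obtain ⟨b1, b2, b3⟩ := b
  simp only [pvKey3, toLex_inj, Prod.mk.injEq] at h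
  obtain ⟨h1, h2, h3⟩ := h
  simp [h1, h2, h3]

theorem filter_triples (ps : List (Int × List (Int × Int))) (r : Int) :
    (ps.flatMap (fun p => p.2.map (fun iv => (p.1, iv)))).filter (fun q => q.1 == r)
      = ((ps.filter (fun p => p.1 == r)).flatMap (fun p => p.2)).map (fun iv => (r, iv)) := by
  induction ps with
  | nil => rfl
  | cons p ps ih =>
    simp only [List.flatMap_cons, List.filter_append, ih, List.filter_cons, List.filter_map]
    by_cases h : p.1 = r
    · simp [Function.comp_def, h]
    · simp [Function.comp_def, h]

-- a list with keys drawn from a duplicate-free key list is a permutation of its key blocks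
theorem perm_flatMap_filter {β : Type} :
    ∀ (ks : List Int) (q : List (Int × β)), ks.Nodup → (∀ x ∈ q, x.1 ∈ ks) →
      q.Perm (ks.flatMap (fun r => q.filter (fun x => x.1 == r))) := by
  intro ks
  induction ks with
  | nil =>
    intro q _ hm
    cases q with
    | nil => simp
    | cons x _ => exact absurd (hm x (List.mem_cons_self ..)) (by simp)
  | cons r ks ih =>
    intro q hnd hm
    have hrk : r ∉ ks := (List.nodup_cons.mp hnd).1
    have hdf : ∀ r' ∈ ks,
        (q.filter (fun x => !(x.1 == r))).filter (fun x => x.1 == r')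
          = q.filter (fun x => x.1 == r') := by
      intro r' hr'
      rw [List.filter_filter]
      apply List.filter_congr
      intro x _
      by_cases hx : x.1 = r'
      · have hner : r' ≠ r := fun hc => hrk (hc ▸ hr')
        simp [hx, hner]
      · simp [hx]
    have hrest : (q.filter (fun x => !(x.1 == r))).Perm
        (ks.flatMap (fun r' => q.filter (fun x => x.1 == r'))) := by
      have := ih (q.filter (fun x => !(x.1 == r))) (List.nodup_cons.mp hnd).2
        (by
          intro x hx
          have hxq := List.mem_filter.mp hx
          have := hm x hxq.1
          rcases List.mem_cons.mp this with h | h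
          · exact absurd (by simpa using h) (by simpa using hxq.2)
          · exact h)
      refine this.trans (List.Perm.flatMap (List.Perm.refl ks) ?_)
      intro r' hr'
      rw [hdf r' hr']
    refine ((List.filter_append_perm (fun x => x.1 == r) q).symm).trans ?_
    simp only [List.flatMap_cons]
    exact List.Perm.append_left _ hrest

-- the globally sorted triples decompose into per-row blocks, each sorted by interval
theorem sorted_triples_eq (ps : List (Int × List (Int × Int))) :
    PySem.List.sorted (ps.flatMap (fun p => p.2.map (fun iv => (p.1, iv)))) pvKey3 false
      = (PySem.List.sorted (PySem.Set.ofList (ps.map (fun p => p.1))) (fun r => r) false).flatMap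
          (fun r => (PySem.List.sorted2 ((ps.filter (fun p => p.1 == r)).flatMap (fun p => p.2))
              (fun iv => iv.1) (fun iv => iv.2) false).map (fun iv => (r, iv))) := by
  have hrowsPW := PySem.List.sorted_ofList_pairwise_lt (ps.map (fun p => p.1))
  have hrowsNd : (PySem.List.sorted (PySem.Set.ofList (ps.map (fun p => p.1))) (fun r => r) false).Nodup :=
    hrowsPW.imp (fun h => ne_of_lt h)
  apply PySem.List.eq_of_perm_of_pairwise_le_of_injective pvKey3 pvKey3_injective
  · -- permutation
    refine (PySem.List.sorted_perm _ _ _).trans ?_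
    refine (perm_flatMap_filter _ _ hrowsNd ?_).trans
      (List.Perm.flatMap (List.Perm.refl _) ?_)
    · intro x hx
      obtain ⟨p, hp, hx'⟩ := List.mem_flatMap.mp hx
      obtain ⟨iv, _, rfl⟩ := List.mem_map.mp hx'
      rw [PySem.List.mem_sorted, PySem.Set.mem_ofList]
      exact List.mem_map.mpr ⟨p, hp, rfl⟩
    · intro r _
      rw [filter_triples]
      exact ((PySem.List.sorted2_perm _ _ _ _).map _).symm
  · exact PySem.List.sorted_pairwise _ pvKey3
  · -- the block list is ≤-sorted under the lexicographic key
    rw [List.flatMap_def, List.pairwise_flatten]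
    constructor
    · intro l' hl'
      obtain ⟨r, _, rfl⟩ := List.mem_map.mp hl'
      apply List.pairwise_map.mpr
      have hblk : (PySem.List.sorted2 ((ps.filter (fun p => p.1 == r)).flatMap (fun p => p.2))
          (fun iv => iv.1) (fun iv => iv.2) false).Pairwise
            (fun a b => toLex ((a.1 : Int), (a.2 : Int)) ≤ toLex (b.1, b.2)) := by
        rw [sorted2_eq_sorted_lex]
        exact PySem.List.sorted_pairwise _ _
      refine hblk.imp ?_
      intro a b hab
      show pvKey3 (r, a) ≤ pvKey3 (r, b)
      simp only [pvKey3]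
      exact Prod.Lex.toLex_le_toLex.mpr (Or.inr ⟨rfl, hab⟩)
    · apply List.pairwise_map.mpr
      refine hrowsPW.imp ?_
      intro r r' hlt x hx y hy
      obtain ⟨iv, _, rfl⟩ := List.mem_map.mp hx
      obtain ⟨iv', _, rfl⟩ := List.mem_map.mp hy
      show pvKey3 (r, iv) ≤ pvKey3 (r', iv')
      simp only [pvKey3]
      exact Prod.Lex.toLex_le_toLex.mpr (Or.inl hlt)

theorem main_eq (l : List (List (Int × List (Int × Int)))) :
    merge_rle_runs l = merge_rle_runs_alt l := by
  by_cases hl : l = []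
  · subst hl; rfl
  · have h0 : l.isEmpty = false := by simpa [List.isEmpty_iff] using hl
    unfold merge_rle_runs merge_rle_runs_alt
    rw [h0]
    simp only [Bool.false_eq_true, if_false]
    have hfold :
        l.foldl (fun d rle => rle.foldl (fun d p => d.modify p.1 [] (fun v => v ++ p.2)) d)
            PySem.Dict.empty = pvBuild PySem.Dict.empty l.flatten := by
      unfold pvBuild; exact List.foldl_flatten.symm
    rw [hfold]
    have hkeys := keys_pvBuild l.flatten
    have hnodup : (pvBuild PySem.Dict.empty l.flatten).keys.Nodup := by
      rw [hkeys]; exact PySem.Set.nodup_ofList _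
    have hitems : (pvBuild PySem.Dict.empty l.flatten).items =
        (PySem.Set.ofList (l.flatten.map (fun p => p.1))).map
          (fun k => (k, (pvBuild PySem.Dict.empty l.flatten).getD k [])) := by
      rw [PySem.Dict.items_eq_map_keys _ hnodup [], hkeys]
    have hrowsPW := PySem.List.sorted_ofList_pairwise_lt (l.flatten.map (fun p => p.1))
    have hsorted : PySem.List.sorted (pvBuild PySem.Dict.empty l.flatten).items
          (fun p => p.1) =
        (PySem.List.sorted (PySem.Set.ofList (l.flatten.map (fun p => p.1))) (fun r => r) false).map
          (fun k => (k, (pvBuild PySem.Dict.empty l.flatten).getD k [])) := by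
      apply PySem.List.sorted_eq_of_perm_of_pairwise_lt
      · rw [hitems]; exact (PySem.List.sorted_perm _ _ _).map _
      · exact List.pairwise_map.mpr hrowsPW
    rw [hsorted]
    have hins := PySem.Dict.items_foldl_insert_fresh
          ((PySem.List.sorted (PySem.Set.ofList (l.flatten.map (fun p => p.1))) (fun r => r) false).map
            (fun k => (k, (pvBuild PySem.Dict.empty l.flatten).getD k [])))
          (fun p => p.1)
          (fun p => pvMergeIntervals (PySem.List.sorted2 p.2 (fun iv => iv.1) (fun iv => iv.2)))
          PySem.Dict.empty
          (fun a _ => PySem.Dict.contains_empty _)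
          (by
            simp only [List.map_map, Function.comp_def]
            simpa using hrowsPW.imp (fun h => ne_of_lt h))
    rw [hins]
    have hemp : (PySem.Dict.empty : PySem.Dict Int (List (Int × Int))).items = [] := rfl
    rw [hemp, List.nil_append, List.map_map]
    show _ = pvJoin
      (PySem.List.sorted (PySem.Set.ofList (l.flatten.map (fun p => p.1))) (fun r => r) false)
      (PySem.List.sorted (l.flatten.flatMap (fun p => p.2.map (fun iv => (p.1, iv)))) pvKey3 false)
    rw [sorted_triples_eq l.flatten, pvJoin_blocks _ _ hrowsPW]
    apply List.map_congr_left
    intro r _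
    simp only [Function.comp]
    rw [pvDC_eq, getD_pvBuild]
    simp [PySem.Dict.getD_empty]

-- ===== VERDICT (by name: the statement is the Claim_ definition above) =====
theorem merge_rle_runs_spec : Claim_equal_merge_rle_runs := by
  intro l _
  unfold Spec_merge_rle_runs
  exact main_eq l
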